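-- pv_equiv track=rewrite | github.com/wangy9711/GlyNet | model/IUPAC2graph.py | str_parse
-- ===== SOURCE A (Python) =====
-- def str_parse(encode):
--     i = 0
--     j = 0
--     rets = []
--     L = len(encode)
--     while(i<L):
--         if encode[i]=='[':
--             rets.append(encode[i])
--             i+=1
--         elif encode[i]==']':
--             rets.append(encode[i])
--             i+=1
--         elif encode[i] == '(':
--             j = i
--             while(j<L):
--                 if encode[j] == ')':
--                     break
--                 j+=1
--
--             rets.append(encode[i:j+1])
--             i = j + 1
--         else:
--             j = i
--             while(j<L):
--                 if encode[j]=='(':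
--                     break
--                 j+=1
--
--             rets.append(encode[i:j])
--             i = j
--
--     return rets
-- ===== SOURCE B (Python) =====
-- def str_parse(encode):
--     tokens = []
--     buf = ''
--     in_paren = False
--     for c in encode:
--         if in_paren:
--             buf += c
--             if c == ')':
--                 tokens.append(buf)
--                 buf = ''
--                 in_paren = False
--         elif c == '(':
--             if buf:
--                 tokens.append(buf)
--             buf = c
--             in_paren = True
--         elif (c == '[' or c == ']') and not buf:
--             tokens.append(c)
--         else:
--             buf += c
--     if buf:
--         tokens.append(buf)
--     return tokens
-- ===== Notes on version B (the rewrite author's own statement) =====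
-- stated objective: simpler
-- what changed: Replaced A's index arithmetic with inner while-scans and slicing by a single left-to-right pass over the characters that maintains a token buffer and an inside-parentheses flag, emitting tokens as it goes.
import Mathlib
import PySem

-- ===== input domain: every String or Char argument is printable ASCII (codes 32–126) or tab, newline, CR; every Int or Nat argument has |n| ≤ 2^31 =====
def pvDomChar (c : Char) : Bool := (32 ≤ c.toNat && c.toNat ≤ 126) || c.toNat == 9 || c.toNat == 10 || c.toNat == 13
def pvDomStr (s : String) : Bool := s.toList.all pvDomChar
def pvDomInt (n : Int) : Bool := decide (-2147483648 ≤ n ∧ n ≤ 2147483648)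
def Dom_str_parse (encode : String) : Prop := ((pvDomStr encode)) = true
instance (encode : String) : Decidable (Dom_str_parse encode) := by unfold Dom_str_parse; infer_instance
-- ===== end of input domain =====

-- B replaces A's index-and-slice scanning by one buffered left-to-right pass (simpler; same O(n) cost).

-- ===== PORT A =====
-- inner while loop 'while j<L: if encode[j]==')' : break; j+=1'
def pvFindClose (cs : List Char) (L : Nat) (j : Nat) : Nat :=
  if _h : j < L then
    if cs.getD j ' ' = ')' then j else pvFindClose cs L (j + 1)
  else j
termination_by L - j

-- inner while loop 'while j<L: if encode[j]=='(' : break; j+=1'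
def pvFindOpen (cs : List Char) (L : Nat) (j : Nat) : Nat :=
  if _h : j < L then
    if cs.getD j ' ' = '(' then j else pvFindOpen cs L (j + 1)
  else j
termination_by L - j

theorem pvFindClose_ge (cs : List Char) (L j : Nat) : j ≤ pvFindClose cs L j := by
  unfold pvFindClose
  split
  · split
    · exact le_refl j
    · exact le_trans (Nat.le_succ j) (pvFindClose_ge cs L (j + 1))
  · exact le_refl j
termination_by L - j

theorem pvFindOpen_ge (cs : List Char) (L j : Nat) : j ≤ pvFindOpen cs L j := by
  unfold pvFindOpen
  split
  · split
    · exact le_refl j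
    · exact le_trans (Nat.le_succ j) (pvFindOpen_ge cs L (j + 1))
  · exact le_refl j
termination_by L - j

-- the main 'while(i<L)' loop of A; slices encode[i:j+1] / encode[i:j] as (drop i).take (= PySem.List.slice_natCast)
def pvLoopA (cs : List Char) (L : Nat) (i : Nat) (rets : List String) : List String :=
  if h : i < L then
    if cs.getD i ' ' = '[' then pvLoopA cs L (i + 1) (rets ++ [String.ofList [cs.getD i ' ']])
    else if cs.getD i ' ' = ']' then pvLoopA cs L (i + 1) (rets ++ [String.ofList [cs.getD i ' ']])
    else if hp : cs.getD i ' ' = '(' then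
      pvLoopA cs L (pvFindClose cs L i + 1)
        (rets ++ [String.ofList ((cs.drop i).take (pvFindClose cs L i + 1 - i))])
    else
      pvLoopA cs L (pvFindOpen cs L i)
        (rets ++ [String.ofList ((cs.drop i).take (pvFindOpen cs L i - i))])
  else rets
termination_by L - i
decreasing_by
  · omega
  · omega
  · have := pvFindClose_ge cs L i; omega
  · -- pvFindOpen started at i with cs.getD i ' ' ≠ '(' steps at least once
    have h1 : pvFindOpen cs L i = pvFindOpen cs L (i + 1) := by
      conv_lhs => rw [pvFindOpen]
      rw [dif_pos h, if_neg hp]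
    have := pvFindOpen_ge cs L (i + 1); omega

def str_parse (encode : String) : List String :=
  pvLoopA encode.toList encode.toList.length 0 []

-- ===== PORT B =====
-- the body of B's 'for c in encode' loop; state = (tokens, buf, in_paren)
def pvStepB (st : List String × List Char × Bool) (c : Char) : List String × List Char × Bool :=
  let (tokens, buf, inParen) := st
  if inParen then
    let buf' := buf ++ [c]
    if c = ')' then (tokens ++ [String.ofList buf'], [], false) else (tokens, buf', true)
  else if c = '(' then
    ((if buf ≠ [] then tokens ++ [String.ofList buf] else tokens), [c], true)
  else if (c = '[' ∨ c = ']') ∧ buf = [] then (tokens ++ [String.ofList [c]], [], false)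
  else (tokens, buf ++ [c], false)

-- trailing 'if buf: tokens.append(buf)'
def pvFinishB (st : List String × List Char × Bool) : List String :=
  if st.2.1 ≠ [] then st.1 ++ [String.ofList st.2.1] else st.1

def str_parse_alt (encode : String) : List String :=
  pvFinishB (encode.toList.foldl pvStepB ([], [], false))

-- ===== PRECONDITION & SPEC =====
def Spec_str_parse (encode : String) (out : List String) : Prop := out = str_parse_alt encode
instance (encode : String) (out : List String) : Decidable (Spec_str_parse encode out) := by unfold Spec_str_parse; infer_instance

-- ===== CLAIM (what is proved, stated in full; the proofs are below) =====
def Claim_equal_str_parse : Prop := ∀ (encode : String), Dom_str_parse encode → Spec_str_parse encode (str_parse encode)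

-- ===== LEMMAS AND PROOFS =====

-- common tokenization spec, structural on the character list
def pvScanClose : List Char → List Char × List Char
  | [] => ([], [])
  | c :: r =>
    if c = ')' then ([c], r)
    else (c :: (pvScanClose r).1, (pvScanClose r).2)

theorem pvScanClose_snd_len (l : List Char) : (pvScanClose l).2.length ≤ l.length := by
  induction l with
  | nil => simp [pvScanClose]
  | cons c r ih =>
    by_cases hc : c = ')'
    · simp [pvScanClose, hc]
    · simp only [pvScanClose, if_neg hc, List.length_cons]
      omega

def pvParse : List Char → List String
  | [] => []
  | c :: r =>
    if c = '[' ∨ c = ']' then String.ofList [c] :: pvParse r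
    else if c = '(' then
      let p := pvScanClose r
      String.ofList (c :: p.1) :: pvParse p.2
    else
      String.ofList (c :: r.takeWhile (fun d => !(d = '('))) :: pvParse (r.dropWhile (fun d => !(d = '(')))
termination_by l => l.length
decreasing_by
  · simp only [List.length_cons]; omega
  · have := pvScanClose_snd_len r; simp only [List.length_cons]; omega
  · have := List.length_dropWhile_le (p := fun d => !(d = '(')) (l := r)
    simp only [List.length_cons]; omega

-- characterization of pvScanClose by take/drop at the first ')'
theorem pvScanClose_spec (l : List Char) :
    (pvScanClose l).1 = l.take ((l.takeWhile (fun d => !(d = ')'))).length + 1) ∧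
    (pvScanClose l).2 = l.drop ((l.takeWhile (fun d => !(d = ')'))).length + 1) := by
  induction l with
  | nil => simp [pvScanClose]
  | cons c r ih =>
    by_cases hc : c = ')'
    · simp [pvScanClose, hc, List.takeWhile]
    · simp only [pvScanClose, List.takeWhile, hc, if_neg hc]
      simp only [decide_eq_true_eq] at *
      simp [hc, List.length_cons, List.take_succ_cons, List.drop_succ_cons, ih]

-- ===== A-side: the index loop computes pvParse of the suffix =====

theorem pvFindClose_spec (cs : List Char) (j : Nat) :
    pvFindClose cs cs.length j = j + ((cs.drop j).takeWhile (fun d => !(d = ')'))).length := by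
  by_cases h : j < cs.length
  · have hdrop : cs.drop j = cs[j] :: cs.drop (j + 1) := List.drop_eq_getElem_cons h
    have hgetD : cs.getD j ' ' = cs[j] := List.getD_eq_getElem cs ' ' h
    by_cases hc : cs[j] = ')'
    · unfold pvFindClose
      simp [h, hgetD, hc, hdrop, List.takeWhile]
    · unfold pvFindClose
      have ih := pvFindClose_spec cs (j + 1)
      simp only [h, dif_pos, hgetD, hc, if_neg hc, ih, hdrop, List.takeWhile]
      simp [hc]
      omega
  · have hdrop : cs.drop j = [] := List.drop_eq_nil_of_le (by omega)
    unfold pvFindClose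
    simp [h, hdrop]
termination_by cs.length - j

theorem pvFindOpen_spec (cs : List Char) (j : Nat) :
    pvFindOpen cs cs.length j = j + ((cs.drop j).takeWhile (fun d => !(d = '('))).length := by
  by_cases h : j < cs.length
  · have hdrop : cs.drop j = cs[j] :: cs.drop (j + 1) := List.drop_eq_getElem_cons h
    have hgetD : cs.getD j ' ' = cs[j] := List.getD_eq_getElem cs ' ' h
    by_cases hc : cs[j] = '('
    · unfold pvFindOpen
      simp [h, hgetD, hc, hdrop, List.takeWhile]
    · unfold pvFindOpen
      have ih := pvFindOpen_spec cs (j + 1)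
      simp only [h, dif_pos, hgetD, hc, if_neg hc, ih, hdrop, List.takeWhile]
      simp [hc]
      omega
  · have hdrop : cs.drop j = [] := List.drop_eq_nil_of_le (by omega)
    unfold pvFindOpen
    simp [h, hdrop]
termination_by cs.length - j

theorem take_len_takeWhile {α : Type} (p : α → Bool) (l : List α) :
    l.take (l.takeWhile p).length = l.takeWhile p := by
  induction l with
  | nil => simp
  | cons x xs ih =>
    by_cases hx : p x
    · simp [List.takeWhile, hx, ih]
    · simp [List.takeWhile, hx]

theorem drop_len_takeWhile {α : Type} (p : α → Bool) (l : List α) :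
    l.drop (l.takeWhile p).length = l.dropWhile p := by
  induction l with
  | nil => simp
  | cons x xs ih =>
    by_cases hx : p x
    · simp [List.takeWhile, List.dropWhile, hx, ih]
    · simp [List.takeWhile, List.dropWhile, hx]

theorem pvLoopA_eq_parse (cs : List Char) (i : Nat) (rets : List String) :
    pvLoopA cs cs.length i rets = rets ++ pvParse (cs.drop i) := by
  by_cases h : i < cs.length
  · have hdrop : cs.drop i = cs[i] :: cs.drop (i + 1) := List.drop_eq_getElem_cons h
    have hgetD : cs.getD i ' ' = cs[i] := List.getD_eq_getElem cs ' ' h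
    by_cases h1 : cs[i] = '['
    · unfold pvLoopA
      rw [dif_pos h, hgetD, if_pos h1, pvLoopA_eq_parse cs (i + 1)]
      simp [hdrop, pvParse, h1]
    · by_cases h2 : cs[i] = ']'
      · unfold pvLoopA
        rw [dif_pos h, hgetD, if_neg h1, if_pos h2, pvLoopA_eq_parse cs (i + 1)]
        simp [hdrop, pvParse, h1, h2]
      · by_cases h3 : cs[i] = '('
        · -- '(' branch: j = pvFindClose, token = encode[i:j+1]
          have hstep : pvFindClose cs cs.length i = pvFindClose cs cs.length (i + 1) := by
            conv_lhs => rw [pvFindClose]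
            rw [dif_pos h, hgetD, if_neg (by simp [h3])]
          set s := cs.drop (i + 1) with hs
          set k := (s.takeWhile (fun d => !(d = ')'))).length with hk
          have hj : pvFindClose cs cs.length i = i + 1 + k := by
            rw [hstep, pvFindClose_spec]
          have htok : (cs.drop i).take (pvFindClose cs cs.length i + 1 - i) =
              cs[i] :: (pvScanClose s).1 := by
            rw [hdrop, hj]
            have hkk : i + 1 + k + 1 - i = k + 2 := by omega
            rw [hkk]
            have h1' := (pvScanClose_spec s).1
            simp [List.take_succ_cons, h1', hk]
          have hrest : cs.drop (pvFindClose cs cs.length i + 1) = (pvScanClose s).2 := by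
            rw [hj]
            have h2' := (pvScanClose_spec s).2
            rw [h2', ← hk]
            rw [show i + 1 + k + 1 = (i + 1) + (k + 1) by omega, ← List.drop_drop, ← hs]
          unfold pvLoopA
          rw [dif_pos h, hgetD, if_neg h1, if_neg h2, dif_pos h3,
            pvLoopA_eq_parse cs (pvFindClose cs cs.length i + 1)]
          rw [htok, hrest, hdrop]
          simp [pvParse, h1, h2, h3]
        · -- label branch: j = pvFindOpen, token = encode[i:j]
          have hstep : pvFindOpen cs cs.length i = pvFindOpen cs cs.length (i + 1) := by
            conv_lhs => rw [pvFindOpen]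
            rw [dif_pos h, hgetD, if_neg h3]
          set s := cs.drop (i + 1) with hs
          set k := (s.takeWhile (fun d => !(d = '('))).length with hk
          have hj : pvFindOpen cs cs.length i = i + 1 + k := by
            rw [hstep, pvFindOpen_spec]
          have htok : (cs.drop i).take (pvFindOpen cs cs.length i - i) =
              cs[i] :: s.takeWhile (fun d => !(d = '(')) := by
            rw [hdrop, hj]
            have hkk : i + 1 + k - i = k + 1 := by omega
            rw [hkk]
            simp [List.take_succ_cons, hk, take_len_takeWhile]
          have hrest : cs.drop (pvFindOpen cs cs.length i) = s.dropWhile (fun d => !(d = '(')) := by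
            rw [hj, show i + 1 + k = (i + 1) + k by omega, ← List.drop_drop, ← hs, hk,
              drop_len_takeWhile]
          unfold pvLoopA
          rw [dif_pos h, hgetD, if_neg h1, if_neg h2, dif_neg h3,
            pvLoopA_eq_parse cs (pvFindOpen cs cs.length i)]
          rw [htok, hrest, hdrop]
          simp [pvParse, h1, h2, h3]
  · have hdrop : cs.drop i = [] := List.drop_eq_nil_of_le (by omega)
    unfold pvLoopA
    simp [h, hdrop, pvParse]
termination_by cs.length - i
decreasing_by
  · omega
  · omega
  · have := pvFindClose_ge cs cs.length i; omega
  · omega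

-- ===== B-side: the fold computes pvParse =====

theorem pvFoldB_paren (l : List Char) (toks : List String) (buf : List Char) (hb : buf ≠ []) :
    pvFinishB (l.foldl pvStepB (toks, buf, true)) =
    pvFinishB ((pvScanClose l).2.foldl pvStepB
      (toks ++ [String.ofList (buf ++ (pvScanClose l).1)], [], false)) := by
  induction l generalizing toks buf with
  | nil => simp [pvScanClose, pvFinishB, hb]
  | cons c r ih =>
    by_cases hc : c = ')'
    · simp [pvScanClose, hc, List.foldl_cons, pvStepB]
    · have hstep : pvStepB (toks, buf, true) c = (toks, buf ++ [c], true) := by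
        simp [pvStepB, hc]
      rw [List.foldl_cons, hstep, ih toks (buf ++ [c]) (by simp)]
      simp [pvScanClose, hc]

theorem pvFoldB_label (l : List Char) (toks : List String) (buf : List Char) (hb : buf ≠ []) :
    pvFinishB (l.foldl pvStepB (toks, buf, false)) =
    pvFinishB ((l.dropWhile (fun d => !(d = '('))).foldl pvStepB
      (toks ++ [String.ofList (buf ++ l.takeWhile (fun d => !(d = '(')))], [], false)) := by
  induction l generalizing toks buf with
  | nil => simp [pvFinishB, hb]
  | cons c r ih =>
    by_cases hc : c = '('
    · simp [List.takeWhile, List.dropWhile, hc, List.foldl_cons, pvStepB, hb]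
    · have hstep : pvStepB (toks, buf, false) c = (toks, buf ++ [c], false) := by
        simp [pvStepB, hc, hb]
      simp only [List.foldl_cons, hstep]
      rw [ih toks (buf ++ [c]) (by simp)]
      simp [List.takeWhile, List.dropWhile, hc]

theorem pvFoldB_main (l : List Char) (toks : List String) :
    pvFinishB (l.foldl pvStepB (toks, [], false)) = toks ++ pvParse l := by
  match hl : l with
  | [] => simp [pvFinishB, pvParse]
  | c :: r =>
    by_cases hbr : c = '[' ∨ c = ']'
    · have hc : c ≠ '(' := by rcases hbr with h | h <;> simp [h]
      have hstep : pvStepB (toks, [], false) c = (toks ++ [String.ofList [c]], [], false) := by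
        simp [pvStepB, hc, hbr]
      rw [List.foldl_cons, hstep, pvFoldB_main r]
      simp [pvParse, hbr]
    · by_cases hc : c = '('
      · have hstep : pvStepB (toks, [], false) c = (toks, [c], true) := by
          simp [pvStepB, hc]
        rw [List.foldl_cons, hstep, pvFoldB_paren r toks [c] (by simp),
          pvFoldB_main (pvScanClose r).2]
        simp [pvParse, hbr, hc]
      · have hstep : pvStepB (toks, [], false) c = (toks, [c], false) := by
          simp [pvStepB, hc, hbr]
        rw [List.foldl_cons, hstep, pvFoldB_label r toks [c] (by simp),
          pvFoldB_main (r.dropWhile (fun d => !(d = '(')))]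
        simp [pvParse, hbr, hc]
termination_by l.length
decreasing_by
  · simp
  · have := pvScanClose_snd_len r; simp; omega
  · have := List.length_dropWhile_le (p := fun d => !(d = '(')) (l := r); simp; omega

-- ===== VERDICT (by name: the statement is the Claim_ definition above) =====
theorem str_parse_spec : Claim_equal_str_parse := by
  intro encode _
  unfold Spec_str_parse str_parse str_parse_alt
  rw [pvLoopA_eq_parse encode.toList 0 [], pvFoldB_main encode.toList []]
  simp
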